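-- pv_equiv track=rewrite | github.com/rohaquinlop/UVa-Solutions | Solved/12190 - Electric Bill.py | consumption
-- ===== SOURCE A (Python) =====
-- def consumption(n):
--   i, res, a = 0, 0, 0
--   while n > 0:
--     if i == 0:
--       a = min(n, 200)
--       res += a//2
--       n -= a
--     elif i == 1:
--       a = min(n, 29700)
--       res += a//3
--       n -= a
--     elif i == 2:
--       a = min(n, 4950000)
--       res += a//5
--       n -= a
--     elif i == 3:
--       res += n//7
--       n = 0
--     i += 1
--   return res
-- ===== SOURCE B (Python) =====
-- def consumption(n):
--     def bill(m, tiers):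
--         if m <= 0 or not tiers:
--             return 0
--         cap, rate = tiers[0]
--         take = m if cap is None else min(m, cap)
--         return take // rate + bill(m - take, tiers[1:])
--     return bill(n, [(200, 2), (29700, 3), (4950000, 5), (None, 7)])
-- ===== Notes on version B (the rewrite author's own statement) =====
-- stated objective: alternative
-- what changed: Replaced the state-machine while loop (tier counter i, mutated n/res/a) by a data-driven structural recursion over an explicit tier table [(cap, rate), ...]: each call consumes the head tier's capped chunk and recurses on the tail with the remaining consumption.
import Mathlib
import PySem

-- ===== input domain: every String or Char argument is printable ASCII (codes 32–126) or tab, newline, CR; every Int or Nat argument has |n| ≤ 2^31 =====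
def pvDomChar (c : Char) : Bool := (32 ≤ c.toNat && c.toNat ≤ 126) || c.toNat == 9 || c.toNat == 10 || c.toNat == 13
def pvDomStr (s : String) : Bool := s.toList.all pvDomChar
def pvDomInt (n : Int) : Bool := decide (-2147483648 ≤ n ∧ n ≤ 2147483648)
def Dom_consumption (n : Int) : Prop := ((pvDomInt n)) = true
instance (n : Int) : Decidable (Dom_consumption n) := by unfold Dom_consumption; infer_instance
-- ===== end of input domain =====

-- B replaces A's 4-state while loop by a structural recursion over an explicit tier table (objective: alternative).


-- ===== PORT A =====
-- the while loop runs at most 4 productive iterations (i = 3 sets n to 0), so fuel 5 is exact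
def consumptionLoop (fuel : Nat) (i res a n : Int) : Int :=
  match fuel with
  | 0 => res
  | fuel + 1 =>
    if n > 0 then
      if i = 0 then
        let a := min n 200
        consumptionLoop fuel (i + 1) (res + PySem.Int.floordiv a 2) a (n - a)
      else if i = 1 then
        let a := min n 29700
        consumptionLoop fuel (i + 1) (res + PySem.Int.floordiv a 3) a (n - a)
      else if i = 2 then
        let a := min n 4950000
        consumptionLoop fuel (i + 1) (res + PySem.Int.floordiv a 5) a (n - a)
      else if i = 3 then
        consumptionLoop fuel (i + 1) (res + PySem.Int.floordiv n 7) a 0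
      else
        consumptionLoop fuel (i + 1) res a n
    else res

def consumption (n : Int) : Int := consumptionLoop 5 0 0 0 n

-- ===== PORT B =====
-- recursion over the tier table: consume the head tier's capped chunk, recurse on the tail
def billRec (m : Int) : List (Option Int × Int) → Int
  | [] => 0
  | (cap, rate) :: rest =>
    if m ≤ 0 then 0
    else
      let take := match cap with | none => m | some c => min m c
      PySem.Int.floordiv take rate + billRec (m - take) rest

def consumption_alt (n : Int) : Int :=
  billRec n [(some 200, 2), (some 29700, 3), (some 4950000, 5), (none, 7)]

-- ===== PRECONDITION & SPEC =====
def Spec_consumption (n : Int) (out : Int) : Prop := out = consumption_alt n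
instance (n : Int) (out : Int) : Decidable (Spec_consumption n out) := by unfold Spec_consumption; infer_instance

-- ===== CLAIM (what is proved, stated in full; the proofs are below) =====
def Claim_equal_consumption : Prop := ∀ (n : Int), Dom_consumption n → Spec_consumption n (consumption n)

-- ===== LEMMAS AND PROOFS =====
theorem fd_pos (a b : Int) (h : 0 < b) : PySem.Int.floordiv a b = a / b :=
  PySem.Int.floordiv_eq_ediv_of_pos h

theorem loop0 (f : Nat) (res a n : Int) :
    consumptionLoop (f + 1) 0 res a n =
      if n > 0 then consumptionLoop f 1 (res + min n 200 / 2) (min n 200) (n - min n 200)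
      else res := by
  simp only [consumptionLoop, fd_pos _ 2 (by norm_num)]
  norm_num

theorem loop1 (f : Nat) (res a n : Int) :
    consumptionLoop (f + 1) 1 res a n =
      if n > 0 then consumptionLoop f 2 (res + min n 29700 / 3) (min n 29700) (n - min n 29700)
      else res := by
  simp only [consumptionLoop, fd_pos _ 3 (by norm_num)]
  norm_num

theorem loop2 (f : Nat) (res a n : Int) :
    consumptionLoop (f + 1) 2 res a n =
      if n > 0 then consumptionLoop f 3 (res + min n 4950000 / 5) (min n 4950000) (n - min n 4950000)
      else res := by
  simp only [consumptionLoop, fd_pos _ 5 (by norm_num)]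
  norm_num

theorem loop3 (f : Nat) (res a n : Int) :
    consumptionLoop (f + 1) 3 res a n =
      if n > 0 then consumptionLoop f 4 (res + n / 7) a 0 else res := by
  simp only [consumptionLoop, fd_pos _ 7 (by norm_num)]
  norm_num

theorem loop_done (f : Nat) (i res a : Int) : consumptionLoop f i res a 0 = res := by
  cases f <;> simp [consumptionLoop]

theorem alt_unfold (n : Int) :
    consumption_alt n =
      if n ≤ 0 then 0 else
        min n 200 / 2 +
        (if n - min n 200 ≤ 0 then 0 else
          min (n - min n 200) 29700 / 3 +
          (if n - min n 200 - min (n - min n 200) 29700 ≤ 0 then 0 else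
            min (n - min n 200 - min (n - min n 200) 29700) 4950000 / 5 +
            (if n - min n 200 - min (n - min n 200) 29700 -
                min (n - min n 200 - min (n - min n 200) 29700) 4950000 ≤ 0 then 0 else
              (n - min n 200 - min (n - min n 200) 29700 -
                min (n - min n 200 - min (n - min n 200) 29700) 4950000) / 7))) := by
  simp only [consumption_alt, billRec, fd_pos _ 2 (by norm_num), fd_pos _ 3 (by norm_num),
    fd_pos _ 5 (by norm_num), fd_pos _ 7 (by norm_num), add_zero]

-- ===== VERDICT (by name: the statement is the Claim_ definition above) =====
theorem consumption_spec : Claim_equal_consumption := by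
  intro n _
  unfold Spec_consumption consumption
  rw [loop0, alt_unfold]
  by_cases h0 : n ≤ 0
  · rw [if_neg (by omega), if_pos h0]
  · rw [if_pos (by omega), if_neg h0, loop1]
    by_cases h1 : n ≤ 200
    · have h : n - min n 200 = 0 := by omega
      rw [h, if_neg (by omega), if_pos (by omega)]
      omega
    · rw [if_pos (by omega), if_neg (by omega), loop2]
      by_cases h2 : n ≤ 29900
      · have h : n - min n 200 - min (n - min n 200) 29700 = 0 := by omega
        rw [h, if_neg (by omega), if_pos (by omega)]
        omega
      · rw [if_pos (by omega), if_neg (by omega), loop3]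
        by_cases h3 : n ≤ 4979900
        · have h : n - min n 200 - min (n - min n 200) 29700 -
              min (n - min n 200 - min (n - min n 200) 29700) 4950000 = 0 := by omega
          rw [h, if_neg (by omega), if_pos (by omega)]
          omega
        · rw [if_pos (by omega), if_neg (by omega), loop_done]
          omega
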